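-- pv_equiv track=rewrite | github.com/Hclover2003/finding_hidden_messages_in_dna | week3/1. motif_enumerate.py | neighbors
-- ===== SOURCE A (Python) =====
-- def hamming_distance(p, q):
--     k = len(p)
--     hamd = 0
--     for i in range(k):
--         if p[i] != q[i]:
--             hamd += 1
--     return hamd
--
-- def neighbors(pattern, d):
--     # if exact match, return pattern
--     if d == 0:
--         return [pattern]
--     # if length 1, neighbors are each of the 4 nucleotides
--     if len(pattern) == 1:
--         return ['A', 'C', 'G', 'T']
--     neighbourhood = []
--     suffix = pattern[1:]
--     # strings that differ from pattern[i:] by d or less mismatches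
--     suffix_neighbours = neighbors(suffix, d)
--     # for each string in the neighbours of the given pattern - 1
--     for text in suffix_neighbours:
--         # if differs from string by at most 1 less than d
--         if hamming_distance(suffix, text) < d:
--             # adds a prefix to the pattern, adds to the pattern neighbourhood
--             for i in ['A', 'C', 'G', 'T']:
--                 neighbourhood.append(i+text)
--         # if differs from string by d, just add it to the neighbourhood with exact match for first letter
--         else:
--             neighbourhood.append(pattern[0]+text)
--     return neighbourhood
-- ===== SOURCE B (Python) =====
-- def neighbors(pattern, d):
--     # Iterative right-to-left fold carrying each candidate's mismatch count,
--     # instead of recursion + recomputed hamming_distance.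
--     if d == 0:
--         return [pattern]
--     if len(pattern) == 1:
--         return ['A', 'C', 'G', 'T']
--     work = [(c, 0 if c == pattern[-1] else 1) for c in 'ACGT']
--     for ch in pattern[-2::-1]:
--         new = []
--         for text, dist in work:
--             if dist < d:
--                 for b in 'ACGT':
--                     new.append((b + text, dist + (0 if b == ch else 1)))
--             else:
--                 new.append((ch + text, dist))
--         work = new
--     return [text for text, _ in work]
-- ===== Notes on version B (the rewrite author's own statement) =====
-- stated objective: alternative
-- what changed: Replaces the recursive suffix decomposition (which recomputes hamming_distance for every suffix neighbor at every level) with an iterative right-to-left fold over the pattern that carries each candidate's mismatch count in a (string, dist) work list.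
import Mathlib
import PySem

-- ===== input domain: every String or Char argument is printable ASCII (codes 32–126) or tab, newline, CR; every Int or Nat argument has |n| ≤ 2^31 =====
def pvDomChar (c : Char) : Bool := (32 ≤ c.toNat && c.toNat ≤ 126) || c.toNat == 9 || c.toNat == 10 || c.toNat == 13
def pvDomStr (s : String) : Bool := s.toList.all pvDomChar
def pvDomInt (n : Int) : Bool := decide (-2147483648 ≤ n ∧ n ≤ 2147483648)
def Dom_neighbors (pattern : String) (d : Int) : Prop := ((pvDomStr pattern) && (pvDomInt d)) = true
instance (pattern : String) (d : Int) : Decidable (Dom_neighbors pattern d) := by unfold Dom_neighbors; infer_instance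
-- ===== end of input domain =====

-- B rewrites the recursive neighbor generation as an iterative right-to-left fold
-- carrying each candidate's mismatch count (objective: alternative decomposition).
-- Pre_ excludes the empty pattern with d ≠ 0, where A recurses forever (RecursionError)
-- and B raises IndexError.


-- ===== PORT A =====
-- hamming_distance: loop over range(len p); exact at all of A's call sites (equal lengths)
def hammingL (p q : List Char) : Int :=
  (List.range p.length).foldl (fun hamd i => if p.getD i ' ' ≠ q.getD i ' ' then hamd + 1 else hamd) 0

-- recursive body of A over the pattern's character list
def neighborsA (p : List Char) (d : Int) : List (List Char) :=
  if d = 0 then [p]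
  else if p.length = 1 then [['A'], ['C'], ['G'], ['T']]
  else match p with
  | [] => []   -- Python A recurses forever here (RecursionError); excluded by Pre_
  | c :: suffix =>
    (neighborsA suffix d).foldl
      (fun nb text =>
        if hammingL suffix text < d then nb ++ (['A', 'C', 'G', 'T'].map (fun i => i :: text))
        else nb ++ [c :: text]) []

def neighbors (pattern : String) (d : Int) : List String :=
  (neighborsA pattern.toList d).map String.ofList

-- ===== PORT B =====
-- one pass of B's inner loop: rebuild the work list for the next character to the left
def altStep (d : Int) (ch : Char) (work : List (List Char × Int)) : List (List Char × Int) :=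
  work.foldl
    (fun acc td =>
      if td.2 < d then acc ++ (['A', 'C', 'G', 'T'].map (fun b => (b :: td.1, td.2 + if b = ch then 0 else 1)))
      else acc ++ [(ch :: td.1, td.2)]) []

def neighbors_alt (pattern : String) (d : Int) : List String :=
  if d = 0 then [pattern]
  else if pattern.toList.length = 1 then ["A", "C", "G", "T"]
  else match pattern.toList.reverse with
  | [] => []   -- Python B raises IndexError on the empty pattern; excluded by Pre_
  | lastC :: rest =>
    ((rest.foldl (fun w ch => altStep d ch w)
        (['A', 'C', 'G', 'T'].map (fun c => ([c], if c = lastC then (0 : Int) else 1)))).map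
      (fun td => String.ofList td.1))

-- ===== PRECONDITION & SPEC =====
-- Pre_ excludes only the empty pattern with d ≠ 0: there A raises RecursionError
-- (infinite recursion on the empty suffix) and B raises IndexError.
def Pre_neighbors (pattern : String) (d : Int) : Prop := pattern.toList ≠ [] ∨ d = 0
instance (pattern : String) (d : Int) : Decidable (Pre_neighbors pattern d) := by unfold Pre_neighbors; infer_instance
def pvWitness_neighbors : String × Int := ("AC", 1)

def Spec_neighbors (pattern : String) (d : Int) (out : List String) : Prop := out = neighbors_alt pattern d
instance (pattern : String) (d : Int) (out : List String) : Decidable (Spec_neighbors pattern d out) := by unfold Spec_neighbors; infer_instance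

-- ===== CLAIM (what is proved, stated in full; the proofs are below) =====
def Claim_equal_neighbors : Prop := ∀ (pattern : String) (d : Int), Dom_neighbors pattern d → Pre_neighbors pattern d → Spec_neighbors pattern d (neighbors pattern d)

-- ===== LEMMAS AND PROOFS =====

theorem foldl_count_shift (P : Nat → Prop) [DecidablePred P] :
    ∀ (l : List Nat) (a : Int),
      l.foldl (fun h i => if P i then h + 1 else h) a
        = a + l.foldl (fun h i => if P i then h + 1 else h) 0 := by
  intro l
  induction l with
  | nil => simp
  | cons x xs ih =>
    intro a
    simp only [List.foldl_cons]
    rw [ih, ih (if P x then 0 + 1 else 0)]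
    split_ifs <;> omega

theorem hammingL_cons (c x : Char) (p q : List Char) :
    hammingL (c :: p) (x :: q) = (if c ≠ x then 1 else 0) + hammingL p q := by
  unfold hammingL
  simp only [List.length_cons]
  rw [List.range_succ_eq_map, List.foldl_cons, List.foldl_map]
  simp only [List.getD_cons_succ, List.getD_cons_zero]
  rw [foldl_count_shift (fun i => p.getD i ' ' ≠ q.getD i ' ')]
  split_ifs <;> simp

theorem hammingL_nil : hammingL [] [] = 0 := by simp [hammingL]

theorem hammingL_single (c x : Char) :
    hammingL [c] [x] = if c = x then (0 : Int) else 1 := by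
  rw [hammingL_cons, hammingL_nil]
  by_cases h : c = x <;> simp [h]

theorem altStep_eq (d : Int) (ch : Char) (s : List Char) (hs : s ≠ []) (hd : d ≠ 0) :
    altStep d ch ((neighborsA s d).map (fun t => (t, hammingL s t)))
      = (neighborsA (ch :: s) d).map (fun t => (t, hammingL (ch :: s) t)) := by
  have hlen : (ch :: s).length ≠ 1 := by
    cases s with
    | nil => exact absurd rfl hs
    | cons a b => simp
  conv_rhs => rw [neighborsA]
  simp only [hd, hlen, if_false]
  unfold altStep
  rw [List.foldl_map]
  generalize neighborsA s d = ts
  suffices h : ∀ (ts : List (List Char)) (acc0 : List (List Char × Int)) (acc1 : List (List Char)),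
      acc0 = acc1.map (fun t => (t, hammingL (ch :: s) t)) →
      ts.foldl
        (fun acc t =>
          if hammingL s t < d then acc ++ (['A','C','G','T'].map (fun b => (b :: t, hammingL s t + if b = ch then 0 else 1)))
          else acc ++ [(ch :: t, hammingL s t)]) acc0
        = (ts.foldl
            (fun nb text =>
              if hammingL s text < d then nb ++ (['A','C','G','T'].map (fun i => i :: text))
              else nb ++ [ch :: text]) acc1).map (fun t => (t, hammingL (ch :: s) t)) by
    exact h ts [] [] rfl
  intro ts'
  induction ts' with
  | nil => intro acc0 acc1 hacc; simpa using hacc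
  | cons t ts' ih =>
    intro acc0 acc1 hacc
    simp only [List.foldl_cons]
    apply ih
    subst hacc
    by_cases hlt : hammingL s t < d
    · simp only [hlt, if_true, List.map_append, List.map_map]
      congr 1
      have hb : ∀ b : Char, (b :: t, hammingL s t + if b = ch then (0:Int) else 1)
          = (b :: t, hammingL (ch :: s) (b :: t)) := by
        intro b
        rw [hammingL_cons]
        by_cases hbc : b = ch
        · simp [hbc]
        · have hcb : ch ≠ b := fun h => hbc h.symm
          simp only [hbc, if_false, hcb, ne_eq, not_false_eq_true, if_true, Prod.mk.injEq,
            true_and]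
          ring
      simp [hb]
    · simp only [hlt, if_false, List.map_append]
      congr 1
      simp [hammingL_cons]

theorem inv_lemma (d : Int) (hd : d ≠ 0) :
    ∀ (rest : List Char) (s : List Char), s ≠ [] →
      rest.foldl (fun w ch => altStep d ch w) ((neighborsA s d).map (fun t => (t, hammingL s t)))
        = (neighborsA (rest.reverse ++ s) d).map (fun t => (t, hammingL (rest.reverse ++ s) t)) := by
  intro rest
  induction rest with
  | nil => intro s hs; simp
  | cons ch rest ih =>
    intro s hs
    simp only [List.foldl_cons]
    rw [altStep_eq d ch s hs hd, ih (ch :: s) (by simp)]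
    simp

theorem work0_eq (lastC : Char) (d : Int) (hd : d ≠ 0) :
    (['A', 'C', 'G', 'T'].map (fun c => ([c], if c = lastC then (0 : Int) else 1)))
      = (neighborsA [lastC] d).map (fun t => (t, hammingL [lastC] t)) := by
  rw [neighborsA.eq_def]
  simp only [hd, if_false, List.length_cons, List.length_nil, if_true]
  simp [hammingL_single, eq_comm]

-- ===== VERDICT (by name: the statement is the Claim_ definition above) =====
theorem neighbors_spec : Claim_equal_neighbors := by
  intro pattern d _ hpre
  unfold Spec_neighbors neighbors neighbors_alt
  by_cases hd : d = 0
  · subst hd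
    rw [neighborsA.eq_def]
    simp
  · simp only [hd, if_false]
    by_cases h1 : pattern.toList.length = 1
    · rw [neighborsA.eq_def]
      simp only [hd, if_false, h1, if_true]
      rfl
    · simp only [h1, if_false]
      have hne : pattern.toList ≠ [] := by
        rcases hpre with hp | hp
        · exact hp
        · exact absurd hp hd
      cases hrev : pattern.toList.reverse with
      | nil => exact absurd (by simpa using congrArg List.reverse hrev) hne
      | cons lastC rest =>
        dsimp only
        rw [work0_eq lastC d hd, inv_lemma d hd rest [lastC] (by simp)]
        have hp : rest.reverse ++ [lastC] = pattern.toList := by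
          have := congrArg List.reverse hrev
          simpa using this.symm
        rw [hp, List.map_map]
        rfl
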